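-- pv_equiv track=rewrite | github.com/aaronlolo326/flame | custom_models/lact_model/ttt_operation.py | _iter_bucket_minibatches
-- ===== SOURCE A (Python) =====
-- from typing import List, Tuple, Optional
--
-- def _iter_bucket_minibatches(
--     seg_meta: List[Tuple[int, int, int]],
--     max_segments_per_bucket: Optional[int],
-- ):
--     if max_segments_per_bucket is None or max_segments_per_bucket <= 0:
--         yield seg_meta
--         return
--     for i in range(0, len(seg_meta), max_segments_per_bucket):
--         yield seg_meta[i : i + max_segments_per_bucket]
-- ===== SOURCE B (Python) =====
-- from typing import List, Tuple, Optional
--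
-- def _iter_bucket_minibatches(
--     seg_meta: List[Tuple[int, int, int]],
--     max_segments_per_bucket: Optional[int],
-- ):
--     if max_segments_per_bucket is None or max_segments_per_bucket <= 0:
--         yield seg_meta
--         return
--     buffer = []
--     for item in seg_meta:
--         buffer.append(item)
--         if len(buffer) == max_segments_per_bucket:
--             yield buffer
--             buffer = []
--     if buffer:
--         yield buffer
-- ===== Notes on version B (the rewrite author's own statement) =====
-- stated objective: alternative
-- what changed: Replaces start-index slicing over range(0, len, k) with a single element-wise pass that accumulates items in a buffer and emits it each time it reaches k, flushing a non-empty remainder at the end.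
import Mathlib
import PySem

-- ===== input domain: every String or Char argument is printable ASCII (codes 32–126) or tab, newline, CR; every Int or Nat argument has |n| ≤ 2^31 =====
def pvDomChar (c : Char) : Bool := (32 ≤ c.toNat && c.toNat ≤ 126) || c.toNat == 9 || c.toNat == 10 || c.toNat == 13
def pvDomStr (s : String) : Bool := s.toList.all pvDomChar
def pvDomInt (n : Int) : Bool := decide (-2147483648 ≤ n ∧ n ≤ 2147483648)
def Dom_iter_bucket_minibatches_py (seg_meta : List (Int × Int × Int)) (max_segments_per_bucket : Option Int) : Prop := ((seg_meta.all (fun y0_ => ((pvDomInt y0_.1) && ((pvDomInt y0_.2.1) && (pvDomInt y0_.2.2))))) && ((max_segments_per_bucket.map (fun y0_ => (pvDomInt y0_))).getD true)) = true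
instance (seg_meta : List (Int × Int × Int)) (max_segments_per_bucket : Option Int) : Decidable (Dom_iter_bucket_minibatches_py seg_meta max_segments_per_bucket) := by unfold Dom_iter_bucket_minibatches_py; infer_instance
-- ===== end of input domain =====

-- B replaces A's start-index slicing over range(0, len, k) by a single element-wise
-- buffer-accumulation pass (objective: alternative decomposition, same cost).

-- ===== PORT A =====
def iter_bucket_minibatches_py (seg_meta : List (Int × Int × Int)) (max_segments_per_bucket : Option Int) : List (List (Int × Int × Int)) :=
  match max_segments_per_bucket with
  | none => [seg_meta]
  | some k =>
    if k ≤ 0 then [seg_meta]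
    else
      (PySem.List.pyRange 0 (seg_meta.length : Int) k).map
        (fun i => PySem.List.slice seg_meta (some i) (some (i + k)))

-- ===== PORT B =====
def iter_bucket_minibatches_py_alt (seg_meta : List (Int × Int × Int)) (max_segments_per_bucket : Option Int) : List (List (Int × Int × Int)) :=
  match max_segments_per_bucket with
  | none => [seg_meta]
  | some k =>
    if k ≤ 0 then [seg_meta]
    else
      let st := seg_meta.foldl
        (fun (s : List (List (Int × Int × Int)) × List (Int × Int × Int)) item =>
          let buf := s.2 ++ [item]
          if (buf.length : Int) = k then (s.1 ++ [buf], []) else (s.1, buf))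
        ([], [])
      if st.2 = [] then st.1 else st.1 ++ [st.2]

-- ===== PRECONDITION & SPEC =====
def Spec_iter_bucket_minibatches_py (seg_meta : List (Int × Int × Int)) (max_segments_per_bucket : Option Int) (out : List (List (Int × Int × Int))) : Prop := out = iter_bucket_minibatches_py_alt seg_meta max_segments_per_bucket
instance (seg_meta : List (Int × Int × Int)) (max_segments_per_bucket : Option Int) (out : List (List (Int × Int × Int))) : Decidable (Spec_iter_bucket_minibatches_py seg_meta max_segments_per_bucket out) := by unfold Spec_iter_bucket_minibatches_py; infer_instance

-- ===== CLAIM (what is proved, stated in full; the proofs are below) =====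
def Claim_equal_iter_bucket_minibatches_py : Prop := ∀ (seg_meta : List (Int × Int × Int)) (max_segments_per_bucket : Option Int), Dom_iter_bucket_minibatches_py seg_meta max_segments_per_bucket → Spec_iter_bucket_minibatches_py seg_meta max_segments_per_bucket (iter_bucket_minibatches_py seg_meta max_segments_per_bucket)

-- ===== LEMMAS AND PROOFS =====

-- Common reference form: chunks of size k (k >= 1), used only by the proofs.
def pvChunks {α : Type} (k : Nat) : List α → List (List α)
  | [] => []
  | x :: xs => (x :: xs.take (k - 1)) :: pvChunks k (xs.drop (k - 1))
termination_by l => l.length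
decreasing_by simp

lemma pvChunks_nil {α : Type} (k : Nat) : pvChunks k ([] : List α) = [] := by
  rw [pvChunks]

lemma pvChunks_cons {α : Type} (k : Nat) (x : α) (xs : List α) :
    pvChunks k (x :: xs) = (x :: xs.take (k - 1)) :: pvChunks k (xs.drop (k - 1)) := by
  rw [pvChunks]

-- A's range/slice pass, in Nat form, computes pvChunks.
lemma pvChunks_range {α : Type} (k : Nat) (hk : 0 < k) :
    ∀ (n : Nat) (l : List α), l.length ≤ n →
      (List.range ((l.length + k - 1) / k)).map (fun j => (l.drop (k * j)).take k)
        = pvChunks k l := by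
  intro n
  induction n with
  | zero =>
    intro l hl
    have : l = [] := List.eq_nil_of_length_eq_zero (Nat.le_zero.mp hl)
    subst this
    simp [pvChunks_nil, Nat.div_eq_of_lt (by omega : k - 1 < k)]
  | succ n ih =>
    intro l hl
    cases l with
    | nil => simp [pvChunks_nil, Nat.div_eq_of_lt (by omega : k - 1 < k)]
    | cons x xs =>
      have hcount : ((x :: xs).length + k - 1) / k
          = ((xs.drop (k - 1)).length + k - 1) / k + 1 := by
        have h1 : (x :: xs).length + k - 1 = xs.length + k := by simp only [List.length_cons]; omega
        have h2 : (xs.drop (k - 1)).length = xs.length - (k - 1) := by simp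
        rw [h1, h2, Nat.add_div_right _ hk]
        rcases Nat.lt_or_ge xs.length (k - 1) with h | h
        · have h0 : xs.length - (k - 1) = 0 := by omega
          rw [h0, Nat.div_eq_of_lt (by omega : xs.length < k),
              Nat.div_eq_of_lt (by omega : 0 + k - 1 < k)]
        · have h0 : xs.length - (k - 1) + k - 1 = xs.length := by omega
          rw [h0]
      rw [hcount, List.range_succ_eq_map, List.map_cons, List.map_map, pvChunks_cons]
      have hhead : ((x :: xs).drop (k * 0)).take k = x :: xs.take (k - 1) := by
        have hk1 : k = (k - 1) + 1 := by omega
        rw [Nat.mul_zero, List.drop_zero, hk1]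
        simp
      rw [hhead]
      congr 1
      have htail : ∀ j : Nat, ((x :: xs).drop (k * (j + 1))).take k
          = ((xs.drop (k - 1)).drop (k * j)).take k := by
        intro j
        have h1 : k * (j + 1) = k + k * j := by ring
        have h2 : (x :: xs).drop k = xs.drop (k - 1) := by
          have hk1 : k = (k - 1) + 1 := by omega
          rw [hk1]; simp
        rw [h1, ← List.drop_drop, h2]
      have hmap : (List.range (((xs.drop (k-1)).length + k - 1) / k)).map
              ((fun j => ((x :: xs).drop (k * j)).take k) ∘ Nat.succ)
          = (List.range (((xs.drop (k-1)).length + k - 1) / k)).map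
              (fun j => ((xs.drop (k-1)).drop (k * j)).take k) := by
        apply List.map_congr_left; intro j _
        simpa using htail j
      rw [hmap]
      apply ih
      have hd : (xs.drop (k - 1)).length ≤ xs.length := by simp
      simp at hl
      omega

-- B's buffer fold, finished with the conditional flush, computes pvChunks.
lemma pvFold_chunks (k : Int) (hk : 0 < k) :
    ∀ (l : List (Int × Int × Int)) (acc : List (List (Int × Int × Int)))
      (buf : List (Int × Int × Int)), buf.length < k.toNat →
      (let st := l.foldl
          (fun (s : List (List (Int × Int × Int)) × List (Int × Int × Int)) item =>
            let b := s.2 ++ [item]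
            if (b.length : Int) = k then (s.1 ++ [b], []) else (s.1, b))
          (acc, buf)
       if st.2 = [] then st.1 else st.1 ++ [st.2])
      = acc ++ pvChunks k.toNat (buf ++ l) := by
  intro l
  induction l with
  | nil =>
    intro acc buf hbuf
    cases buf with
    | nil => simp [pvChunks_nil]
    | cons b bs =>
      simp only [List.foldl_nil, List.append_nil]
      have h1 : bs.take (k.toNat - 1) = bs := by
        apply List.take_of_length_le; simp at hbuf; omega
      have h2 : bs.drop (k.toNat - 1) = [] := by
        apply List.drop_eq_nil_of_le; simp at hbuf; omega
      simp [pvChunks_cons, pvChunks_nil, h1, h2]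
  | cons x t ih =>
    intro acc buf hbuf
    simp only [List.foldl_cons]
    by_cases hfull : (((buf ++ [x]).length : Int)) = k
    · simp only [hfull, reduceIte]
      have hlen : (buf ++ [x]).length = k.toNat := by omega
      have hih := ih (acc ++ [buf ++ [x]]) [] (by simp; omega)
      simp only [List.nil_append] at hih
      rw [hih]
      have hchunk : pvChunks k.toNat (buf ++ x :: t) = (buf ++ [x]) :: pvChunks k.toNat t := by
        have hsplit : buf ++ x :: t = (buf ++ [x]) ++ t := by simp
        rw [hsplit]
        cases hbx : buf ++ [x] with
        | nil => simp at hbx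
        | cons b bs =>
          have hbs : bs.length = k.toNat - 1 := by
            have hl2 : (buf ++ [x]).length = k.toNat := hlen
            rw [hbx] at hl2; simp at hl2; omega
          simp only [List.cons_append, pvChunks_cons]
          rw [List.take_append_of_le_length (by omega),
              List.drop_append_of_le_length (by omega),
              List.take_of_length_le (by omega), List.drop_eq_nil_of_le (by omega)]
          simp
      rw [hchunk]
      simp
    · simp only [hfull, reduceIte]
      have hlt : (buf ++ [x]).length < k.toNat := by
        simp at hfull ⊢; omega
      have hih := ih acc (buf ++ [x]) hlt
      rw [hih]
      simp

theorem iter_bucket_minibatches_py_spec_aux :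
    ∀ (seg_meta : List (Int × Int × Int)) (max_segments_per_bucket : Option Int),
      iter_bucket_minibatches_py seg_meta max_segments_per_bucket
        = iter_bucket_minibatches_py_alt seg_meta max_segments_per_bucket := by
  intro l k?
  cases k? with
  | none => rfl
  | some k =>
    by_cases hk : k ≤ 0
    · simp [iter_bucket_minibatches_py, iter_bucket_minibatches_py_alt, hk]
    · have hkpos : 0 < k := by omega
      obtain ⟨k', rfl⟩ : ∃ k' : Nat, k = (k' : Int) :=
        ⟨k.toNat, (Int.toNat_of_nonneg (by omega)).symm⟩
      have hk' : 0 < k' := by omega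
      simp only [iter_bucket_minibatches_py, iter_bucket_minibatches_py_alt, if_neg hk]
      -- B side via the fold invariant
      have hB := pvFold_chunks _ hkpos l [] [] (by simp; omega)
      simp only [List.nil_append, Int.toNat_natCast] at hB
      rw [hB]
      -- A side: rewrite the pyRange/slice pass to the Nat range/chunk form
      rw [PySem.List.pyRange_of_pos 0 (l.length : Int) hkpos]
      have hcount : (if (0:Int) < (l.length : Int)
            then (((l.length : Int) - 0 + (k':Int) - 1) / (k':Int)).toNat else 0)
          = (l.length + k' - 1) / k' := by
        by_cases hn : (0:Int) < (l.length : Int)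
        · rw [if_pos hn]
          have h1 : ((l.length : Int) - 0 + (k':Int) - 1) = ((l.length + k' - 1 : Nat) : Int) := by
            omega
          rw [h1, ← Int.natCast_div, Int.toNat_natCast]
        · rw [if_neg hn]
          have h0 : l.length = 0 := by omega
          rw [h0, Nat.div_eq_of_lt (by omega : 0 + k' - 1 < k')]
      rw [hcount, List.map_map]
      rw [← pvChunks_range k' hk' l.length l (le_refl _)]
      apply List.map_congr_left
      intro j _
      simp only [Function.comp]
      have h0 : (0 : Int) + (k' : Int) * (j : Int) = ((k' * j : Nat) : Int) := by
        push_cast; ring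
      rw [h0, PySem.List.slice_natCast_add]

-- ===== VERDICT (by name: the statement is the Claim_ definition above) =====
theorem iter_bucket_minibatches_py_spec : Claim_equal_iter_bucket_minibatches_py := by
  intro l k _
  exact iter_bucket_minibatches_py_spec_aux l k
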